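-- pv_equiv track=rewrite | github.com/yizhao-zhu-igt/PEKS-from-PSI-with-ProxyServer | 3_ClouldServer_Pre_Processing.py | check_polynomial
-- ===== SOURCE A (Python) =====
-- def check_polynomial(roots, coeffs, q):
--     for root in roots:
--         result = 0
--         for i, coeff in enumerate(coeffs):
--             result = (result + coeff * pow(root, i, q)) % q
--         if result != 0:
--             return False
--     return True
-- ===== SOURCE B (Python) =====
-- def check_polynomial(roots, coeffs, q):
--     # Horner's rule: evaluate the polynomial mod q with one multiply-add
--     # per coefficient, instead of a fresh modular exponentiation per term.
--     rev = coeffs[::-1]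
--
--     def horner(root):
--         acc = 0
--         for c in rev:
--             acc = (acc * root + c) % q
--         return acc
--
--     return all(horner(root) == 0 for root in roots)
-- ===== Notes on version B (the rewrite author's own statement) =====
-- stated objective: faster
-- what changed: Per root, the polynomial is evaluated by Horner's rule (one modular multiply-add per coefficient over the reversed coefficient list, combined with all()) instead of computing a separate modular exponentiation pow(root, i, q) for every term.
import Mathlib
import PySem

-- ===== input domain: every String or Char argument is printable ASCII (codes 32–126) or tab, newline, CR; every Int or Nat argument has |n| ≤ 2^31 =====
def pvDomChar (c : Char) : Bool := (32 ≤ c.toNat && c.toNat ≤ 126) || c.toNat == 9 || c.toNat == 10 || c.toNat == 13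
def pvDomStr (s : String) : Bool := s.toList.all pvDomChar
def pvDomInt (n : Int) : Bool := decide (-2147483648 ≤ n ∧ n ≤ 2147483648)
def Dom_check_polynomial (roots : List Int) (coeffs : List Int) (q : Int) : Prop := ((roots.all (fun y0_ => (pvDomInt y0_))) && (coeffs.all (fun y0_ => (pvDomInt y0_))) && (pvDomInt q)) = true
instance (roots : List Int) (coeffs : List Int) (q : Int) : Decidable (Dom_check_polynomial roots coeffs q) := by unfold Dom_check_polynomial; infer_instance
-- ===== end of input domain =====

-- B replaces the per-term modular exponentiation pow(root, i, q) by Horner's rule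
-- (one modular multiply-add per coefficient): asymptotically fewer multiplications.

-- ===== PORT A =====
-- pow(root, i, q) for the nonnegative exponents produced by enumerate (i ≥ 0);
-- exact there: (root ** i) % q with Python's floor-sign %.
def pyPow3 (b : Int) (i : Int) (q : Int) : Int := PySem.Int.mod (b ^ i.toNat) q

-- the inner 'for i, coeff in enumerate(coeffs)' loop of A, for one root
def checkRootA (coeffs : List Int) (root : Int) (q : Int) : Int :=
  (PySem.List.enumerate coeffs).foldl
    (fun result ic => PySem.Int.mod (result + ic.2 * pyPow3 root ic.1 q) q) 0

def check_polynomial (roots : List Int) (coeffs : List Int) (q : Int) : Bool :=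
  match roots with
  | [] => true
  | root :: rest =>
      if checkRootA coeffs root q ≠ 0 then false else check_polynomial rest coeffs q

-- ===== PORT B =====
-- the inner Horner loop of B over the reversed coefficient list
def hornerAcc (q : Int) (root : Int) (rev : List Int) : Int :=
  rev.foldl (fun acc c => PySem.Int.mod (acc * root + c) q) 0

def check_polynomial_alt (roots : List Int) (coeffs : List Int) (q : Int) : Bool :=
  let rev := coeffs.reverse
  roots.all (fun root => hornerAcc q root rev == 0)

-- ===== PRECONDITION & SPEC =====
-- Pre_ excludes exactly the inputs where A raises (pow(..., 0) is a ValueError: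
-- q = 0 with both lists nonempty); A returns on every other input.
def Pre_check_polynomial (roots : List Int) (coeffs : List Int) (q : Int) : Prop :=
  roots = [] ∨ coeffs = [] ∨ q ≠ 0
instance (roots : List Int) (coeffs : List Int) (q : Int) : Decidable (Pre_check_polynomial roots coeffs q) := by unfold Pre_check_polynomial; infer_instance

def pvWitness_check_polynomial : List Int × List Int × Int := ([1, 2], [2, -3, 1], 5)

def Spec_check_polynomial (roots : List Int) (coeffs : List Int) (q : Int) (out : Bool) : Prop := out = check_polynomial_alt roots coeffs q
instance (roots : List Int) (coeffs : List Int) (q : Int) (out : Bool) : Decidable (Spec_check_polynomial roots coeffs q out) := by unfold Spec_check_polynomial; infer_instance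

-- ===== CLAIM (what is proved, stated in full; the proofs are below) =====
def Claim_equal_check_polynomial : Prop := ∀ (roots : List Int) (coeffs : List Int) (q : Int), Dom_check_polynomial roots coeffs q → Pre_check_polynomial roots coeffs q → Spec_check_polynomial roots coeffs q (check_polynomial roots coeffs q)

-- ===== LEMMAS AND PROOFS =====

-- the plain (unreduced) value of the polynomial at root, lowest coefficient first
def pvPoly (root : Int) : List Int → Int
  | [] => 0
  | c :: cs => c + root * pvPoly root cs

-- congruence of Python's % (= Int.fmod)
theorem pv_fmod_congr (q x y : Int) (h : q ∣ x - y) :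
    PySem.Int.mod x q = PySem.Int.mod y q := by
  obtain ⟨k, hk⟩ := h
  have hx : x = y + q * k := by linarith
  simp [PySem.Int.mod, hx, Int.add_mul_fmod_self_left]

theorem pv_fmod_sub_dvd (q x : Int) : q ∣ (PySem.Int.mod x q - x) := by
  have h := Int.fmod_add_mul_fdiv x q
  exact ⟨-(x.fdiv q), by simp [PySem.Int.mod]; linarith⟩

-- A's inner loop, reduced = fmod of the unreduced linear fold (nonempty list)
theorem pv_foldlA_eq (root q : Int) :
    ∀ (l : List (Int × Int)) (x : Int), l ≠ [] →
      l.foldl (fun result ic => PySem.Int.mod (result + ic.2 * pyPow3 root ic.1 q) q) x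
        = PySem.Int.mod (x + (l.map (fun ic => ic.2 * root ^ ic.1.toNat)).sum) q := by
  intro l
  induction l with
  | nil => intro x h; exact absurd rfl h
  | cons a l ih =>
    intro x _
    rcases eq_or_ne l [] with hl | hl
    · subst hl
      simp only [List.foldl, List.map, List.sum_cons, List.sum_nil, add_zero]
      apply pv_fmod_congr
      obtain ⟨k2, hk2⟩ := pv_fmod_sub_dvd q (root ^ a.1.toNat)
      have hm : PySem.Int.mod (root ^ a.1.toNat) q = root ^ a.1.toNat + q * k2 := by linarith
      refine ⟨a.2 * k2, ?_⟩
      simp only [pyPow3, hm]; ring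
    · rw [List.foldl_cons, ih _ hl]
      rw [List.map_cons, List.sum_cons]
      apply pv_fmod_congr
      have h1 := pv_fmod_sub_dvd q (x + a.2 * pyPow3 root a.1 q)
      obtain ⟨k1, hk1⟩ := h1
      obtain ⟨k2, hk2⟩ := pv_fmod_sub_dvd q (root ^ a.1.toNat)
      refine ⟨k1 + a.2 * k2, ?_⟩
      have : pyPow3 root a.1 q = root ^ a.1.toNat + q * k2 := by
        simp only [pyPow3] at hk2 ⊢; linarith
      rw [this] at hk1 ⊢
      ring_nf
      ring_nf at hk1
      linarith

-- Horner's loop, reduced = fmod of the unreduced Horner fold (nonempty list)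
theorem pv_foldlH_eq (root q : Int) :
    ∀ (l : List Int) (x : Int), l ≠ [] →
      l.foldl (fun acc c => PySem.Int.mod (acc * root + c) q) x
        = PySem.Int.mod (l.foldl (fun acc c => acc * root + c) x) q := by
  intro l
  induction l with
  | nil => intro x h; exact absurd rfl h
  | cons a l ih =>
    intro x _
    rcases eq_or_ne l [] with hl | hl
    · subst hl; simp [List.foldl]
    · rw [List.foldl_cons, List.foldl_cons, ih _ hl]
      -- unreduced Horner fold is affine in its accumulator
      have affine : ∀ (m : List Int) (u v : Int),
          m.foldl (fun acc c => acc * root + c) u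
            - m.foldl (fun acc c => acc * root + c) v
            = (u - v) * root ^ m.length := by
        intro m
        induction m with
        | nil => intro u v; simp
        | cons b m ihm =>
          intro u v
          simp only [List.foldl_cons, List.length_cons, ihm]
          ring
      apply pv_fmod_congr
      obtain ⟨k, hk⟩ := pv_fmod_sub_dvd q (x * root + a)
      refine ⟨k * root ^ l.length, ?_⟩
      have := affine l (PySem.Int.mod (x * root + a) q) (x * root + a)
      rw [hk] at this
      rw [this]; ring

-- unreduced Horner over the reversed list = a·rootⁿ + pvPoly
theorem pv_horner_unred (root : Int) :
    ∀ (cs : List Int) (a : Int),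
      cs.reverse.foldl (fun acc c => acc * root + c) a
        = a * root ^ cs.length + pvPoly root cs := by
  intro cs
  induction cs with
  | nil => intro a; simp [pvPoly]
  | cons c cs ih =>
    intro a
    simp only [List.reverse_cons, List.foldl_append, List.foldl_cons, List.foldl_nil,
      ih, pvPoly, List.length_cons]
    ring

-- unreduced enumerate sum = root^s · pvPoly (s ≥ 0)
theorem pv_enum_sum (root : Int) :
    ∀ (cs : List Int) (s : Int), 0 ≤ s →
      ((PySem.List.enumerate cs s).map (fun ic => ic.2 * root ^ ic.1.toNat)).sum
        = root ^ s.toNat * pvPoly root cs := by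
  intro cs
  induction cs with
  | nil => intro s _; simp [PySem.List.enumerate, pvPoly]
  | cons c cs ih =>
    intro s hs
    rw [PySem.List.enumerate_cons, List.map_cons, List.sum_cons, ih (s + 1) (by omega)]
    have : (s + 1).toNat = s.toNat + 1 := by omega
    rw [this, pvPoly]
    ring

-- per-root: A's inner loop value = B's Horner value
theorem pv_root_eq (coeffs : List Int) (root q : Int) :
    checkRootA coeffs root q = hornerAcc q root coeffs.reverse := by
  rcases eq_or_ne coeffs [] with h | h
  · subst h; simp [checkRootA, hornerAcc, PySem.List.enumerate]
  · have henum : PySem.List.enumerate coeffs 0 ≠ [] := by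
      cases coeffs with
      | nil => exact absurd rfl h
      | cons c cs => simp [PySem.List.enumerate_cons]
    have hrev : coeffs.reverse ≠ [] := by simpa using h
    unfold checkRootA hornerAcc
    rw [pv_foldlA_eq root q _ 0 henum, pv_foldlH_eq root q _ 0 hrev,
      pv_enum_sum root coeffs 0 le_rfl, pv_horner_unred root coeffs]
    norm_num

-- ===== VERDICT (by name: the statement is the Claim_ definition above) =====
theorem check_polynomial_spec : Claim_equal_check_polynomial := by
  intro roots coeffs q hdom hpre
  unfold Spec_check_polynomial
  clear hdom hpre
  induction roots with
  | nil => simp [check_polynomial, check_polynomial_alt]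
  | cons root rest ih =>
    simp only [check_polynomial, check_polynomial_alt, List.all_cons] at *
    rw [pv_root_eq coeffs root q]
    by_cases h : hornerAcc q root coeffs.reverse = 0
    · simpa [h] using ih
    · simp [h]
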